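-- pv_equiv track=rewrite | github.com/yuhao-zh/parallax | src/parallax/sglang/multimodal_utils.py | get_image_token_offsets
-- ===== SOURCE A (Python) =====
-- from typing import Any, List, Optional, Tuple
--
-- def get_image_token_offsets(
--     input_ids: List[int],
--     image_token_id: Optional[int],
--     vision_start_id: Optional[int] = None,
--     vision_end_id: Optional[int] = None,
-- ) -> List[Tuple[int, int]]:
--     offsets = []
--
--     if vision_start_id is not None and vision_end_id is not None:
--         start_indices = [i for i, tok in enumerate(input_ids) if tok == vision_start_id]
--         end_indices = [i for i, tok in enumerate(input_ids) if tok == vision_end_id]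
--
--         for start, end in zip(start_indices, end_indices):
--             if start < end:
--                 offsets.append((start + 1, end - 1))
--     elif image_token_id is not None:
--         start = None
--         for i, tok in enumerate(input_ids):
--             if tok == image_token_id:
--                 if start is None:
--                     start = i
--             elif start is not None:
--                 offsets.append((start, i - 1))
--                 start = None
--         if start is not None:
--             offsets.append((start, len(input_ids) - 1))
--
--     return offsets
-- ===== SOURCE B (Python) =====
-- from typing import List, Optional, Tuple
--
--
-- def get_image_token_offsets(
--     input_ids: List[int],
--     image_token_id: Optional[int],
--     vision_start_id: Optional[int] = None,
--     vision_end_id: Optional[int] = None,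
-- ) -> List[Tuple[int, int]]:
--     if vision_start_id is not None and vision_end_id is not None:
--         start_indices = [i for i, tok in enumerate(input_ids) if tok == vision_start_id]
--         end_indices = [i for i, tok in enumerate(input_ids) if tok == vision_end_id]
--         return [(s + 1, e - 1) for s, e in zip(start_indices, end_indices) if s < e]
--     if image_token_id is not None:
--         n = len(input_ids)
--         # boundary detection: a run starts where an image token has no image token
--         # before it, and ends where it has none after it; pair them up positionally
--         run_starts = [i for i in range(n)
--                       if input_ids[i] == image_token_id
--                       and (i == 0 or input_ids[i - 1] != image_token_id)]
--         run_ends = [i for i in range(n)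
--                     if input_ids[i] == image_token_id
--                     and (i == n - 1 or input_ids[i + 1] != image_token_id)]
--         return list(zip(run_starts, run_ends))
--     return []
-- ===== Notes on version B (the rewrite author's own statement) =====
-- stated objective: alternative
-- what changed: The image-token branch's single-pass start=None state machine is replaced by two staged boundary-detection passes (indices whose left neighbour is not an image token = run starts, indices whose right neighbour is not = run ends) zipped together, mirroring the staged comprehensions-plus-zip style of the vision_start/end branch; that branch itself is recast as comprehensions with early returns.
import Mathlib
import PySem

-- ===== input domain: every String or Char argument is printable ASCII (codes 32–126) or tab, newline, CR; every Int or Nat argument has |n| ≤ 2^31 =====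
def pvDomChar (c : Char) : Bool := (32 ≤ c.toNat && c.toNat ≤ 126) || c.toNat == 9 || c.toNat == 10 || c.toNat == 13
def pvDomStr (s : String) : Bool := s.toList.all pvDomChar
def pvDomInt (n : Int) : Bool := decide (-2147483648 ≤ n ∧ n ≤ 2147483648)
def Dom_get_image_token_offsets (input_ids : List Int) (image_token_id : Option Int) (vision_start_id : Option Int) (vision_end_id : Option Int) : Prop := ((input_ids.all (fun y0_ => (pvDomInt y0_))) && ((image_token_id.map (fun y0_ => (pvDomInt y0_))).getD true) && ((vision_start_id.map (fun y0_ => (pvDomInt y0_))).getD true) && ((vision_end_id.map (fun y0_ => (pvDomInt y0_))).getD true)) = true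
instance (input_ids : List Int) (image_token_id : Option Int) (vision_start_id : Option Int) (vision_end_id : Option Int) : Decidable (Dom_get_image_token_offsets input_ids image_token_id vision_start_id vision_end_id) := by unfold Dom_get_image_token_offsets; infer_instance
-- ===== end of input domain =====

-- B replaces branch 2's start=None state machine by two staged boundary-detection
-- passes (run starts / run ends by neighbour comparison) zipped together
-- (objective: alternative); branch 1 becomes comprehensions with early returns.

-- shared helper: Python's enumerate, with Int indices starting at k
def pvEnum (k : Int) : List Int → List (Int × Int)
  | [] => []
  | x :: xs => (k, x) :: pvEnum (k + 1) xs

-- ===== PORT A =====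
def get_image_token_offsets (input_ids : List Int) (image_token_id : Option Int) (vision_start_id : Option Int) (vision_end_id : Option Int) : List (Int × Int) :=
  match vision_start_id, vision_end_id with
  | some vs, some ve =>
    let start_indices := (pvEnum 0 input_ids).filterMap (fun p => if p.2 = vs then some p.1 else none)
    let end_indices := (pvEnum 0 input_ids).filterMap (fun p => if p.2 = ve then some p.1 else none)
    (start_indices.zip end_indices).foldl
      (fun offsets p => if p.1 < p.2 then offsets ++ [(p.1 + 1, p.2 - 1)] else offsets) []
  | _, _ =>
    match image_token_id with
    | some img =>
      let st := (pvEnum 0 input_ids).foldl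
        (fun (s : Option Int × List (Int × Int)) p =>
          if p.2 = img then
            match s.1 with
            | none => (some p.1, s.2)
            | some _ => s
          else
            match s.1 with
            | some start => (none, s.2 ++ [(start, p.1 - 1)])
            | none => s)
        (none, [])
      match st.1 with
      | some start => st.2 ++ [(start, (input_ids.length : Int) - 1)]
      | none => st.2
    | none => []

-- ===== PORT B =====
-- Python's enumerate again, as Source B's first branch uses it (B-side copy)
def bEnum (k : Int) : List Int → List (Int × Int)
  | [] => []
  | x :: xs => (k, x) :: bEnum (k + 1) xs

-- [i for i in range(n) if ids[i]==img and (i==0 or ids[i-1]!=img)]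
-- getD's default is never consulted: ids[i-1] is only reached (in Python, by
-- short-circuit; here, by the ∨'s left disjunct deciding the condition) when 1 ≤ i < n
def bRunStarts (img : Int) (ids : List Int) : List Int :=
  (List.range ids.length).filterMap (fun i =>
    if ids.getD i 0 = img ∧ (i = 0 ∨ ¬ ids.getD (i - 1) 0 = img) then some (i : Int) else none)

-- [i for i in range(n) if ids[i]==img and (i==n-1 or ids[i+1]!=img)]  (same remark on getD)
def bRunEnds (img : Int) (ids : List Int) : List Int :=
  (List.range ids.length).filterMap (fun i =>
    if ids.getD i 0 = img ∧ (i = ids.length - 1 ∨ ¬ ids.getD (i + 1) 0 = img) then some (i : Int) else none)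

-- the image_token_id branch of Source B
def bImageBranch (input_ids : List Int) (image_token_id : Option Int) : List (Int × Int) :=
  match image_token_id with
  | some img => (bRunStarts img input_ids).zip (bRunEnds img input_ids)
  | none => []

def get_image_token_offsets_alt (input_ids : List Int) (image_token_id : Option Int) (vision_start_id : Option Int) (vision_end_id : Option Int) : List (Int × Int) :=
  match vision_start_id with
  | some vs =>
    match vision_end_id with
    | some ve =>
      let start_indices := (bEnum 0 input_ids).filterMap (fun p => if p.2 = vs then some p.1 else none)
      let end_indices := (bEnum 0 input_ids).filterMap (fun p => if p.2 = ve then some p.1 else none)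
      (start_indices.zip end_indices).filterMap
        (fun p => if p.1 < p.2 then some (p.1 + 1, p.2 - 1) else none)
    | none => bImageBranch input_ids image_token_id
  | none => bImageBranch input_ids image_token_id

-- ===== PRECONDITION & SPEC =====
def Spec_get_image_token_offsets (input_ids : List Int) (image_token_id : Option Int) (vision_start_id : Option Int) (vision_end_id : Option Int) (out : List (Int × Int)) : Prop := out = get_image_token_offsets_alt input_ids image_token_id vision_start_id vision_end_id
instance (input_ids : List Int) (image_token_id : Option Int) (vision_start_id : Option Int) (vision_end_id : Option Int) (out : List (Int × Int)) : Decidable (Spec_get_image_token_offsets input_ids image_token_id vision_start_id vision_end_id out) := by unfold Spec_get_image_token_offsets; infer_instance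

-- ===== CLAIM (what is proved, stated in full; the proofs are below) =====
def Claim_equal_get_image_token_offsets : Prop := ∀ (input_ids : List Int) (image_token_id : Option Int) (vision_start_id : Option Int) (vision_end_id : Option Int), Dom_get_image_token_offsets input_ids image_token_id vision_start_id vision_end_id → Spec_get_image_token_offsets input_ids image_token_id vision_start_id vision_end_id (get_image_token_offsets input_ids image_token_id vision_start_id vision_end_id)

-- ===== LEMMAS AND PROOFS =====

-- runs of the image token in enumerate form: (first index, last index) of each
-- maximal consecutive run — the common middle ground both ports are reduced to
def pvRuns (img : Int) : List (Int × Int) → List (Int × Int)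
  | [] => []
  | (i, t) :: rest =>
    if t = img then
      let run := rest.takeWhile (fun p => p.2 = img)
      (i, ((run.getLast?.map Prod.fst).getD i)) :: pvRuns img (rest.dropWhile (fun p => p.2 = img))
    else pvRuns img rest
  termination_by l => l.length
  decreasing_by
  · have := List.length_dropWhile_le (fun p : Int × Int => decide (p.2 = img)) rest
    simp; omega
  · simp

-- A's branch-2 loop body (named for the proofs)
def aStep (img : Int) (s : Option Int × List (Int × Int)) (p : Int × Int) : Option Int × List (Int × Int) :=
  if p.2 = img then
    match s.1 with
    | none => (some p.1, s.2)
    | some _ => s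
  else
    match s.1 with
    | some start => (none, s.2 ++ [(start, p.1 - 1)])
    | none => s

-- flush of the final open run
def aFlush (st : Option Int × List (Int × Int)) (fin : Int) : List (Int × Int) :=
  match st.1 with
  | some start => st.2 ++ [(start, fin)]
  | none => st.2

theorem pvEnum_takeWhile (img : Int) (k : Int) (xs : List Int) :
    (pvEnum k xs).takeWhile (fun p => p.2 = img) = pvEnum k (xs.takeWhile (fun t => t = img)) := by
  induction xs generalizing k with
  | nil => rfl
  | cons x xs ih =>
    by_cases h : x = img <;> simp [pvEnum, h, ih]

theorem pvEnum_dropWhile (img : Int) (k : Int) (xs : List Int) :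
    (pvEnum k xs).dropWhile (fun p => p.2 = img)
      = pvEnum (k + (xs.takeWhile (fun t => t = img)).length) (xs.dropWhile (fun t => t = img)) := by
  induction xs generalizing k with
  | nil => rfl
  | cons x xs ih =>
    by_cases h : x = img
    · simp [pvEnum, h, ih]
      ring_nf
    · simp [pvEnum, h]

theorem pvEnum_last_fst (k : Int) (xs : List Int) :
    (pvEnum k xs).getLast?.map Prod.fst
      = if xs.isEmpty then none else some (k + (xs.length : Int) - 1) := by
  induction xs generalizing k with
  | nil => rfl
  | cons x xs ih =>
    cases xs with
    | nil =>
      simp [pvEnum]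
    | cons y ys =>
      have h := ih (k + 1)
      rw [show pvEnum k (x :: y :: ys) = (k, x) :: pvEnum (k + 1) (y :: ys) from rfl,
        show pvEnum (k + 1) (y :: ys) = (k + 1, y) :: pvEnum (k + 1 + 1) ys from rfl]
      rw [show pvEnum (k + 1) (y :: ys) = (k + 1, y) :: pvEnum (k + 1 + 1) ys from rfl] at h
      rw [List.getLast?_cons_cons, h]
      simp only [List.isEmpty_cons, Bool.false_eq_true, if_false, List.length_cons]
      push_cast
      ring_nf

theorem run_end_getD (k : Int) (tw : List Int) :
    (((pvEnum (k + 1) tw).getLast?.map Prod.fst).getD k) = k + 1 + (tw.length : Int) - 1 := by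
  rw [pvEnum_last_fst]
  cases tw with
  | nil => simp
  | cons t ts =>
    simp

theorem aStep_img_none (img i : Int) (acc : List (Int × Int)) :
    aStep img (none, acc) (i, img) = (some i, acc) := by simp [aStep]
theorem aStep_img_some (img i s : Int) (acc : List (Int × Int)) :
    aStep img (some s, acc) (i, img) = (some s, acc) := by simp [aStep]
theorem aStep_ne_none (img i t : Int) (acc : List (Int × Int)) (h : ¬ t = img) :
    aStep img (none, acc) (i, t) = (none, acc) := by simp [aStep, h]
theorem aStep_ne_some (img i t s : Int) (acc : List (Int × Int)) (h : ¬ t = img) :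
    aStep img (some s, acc) (i, t) = (none, acc ++ [(s, i - 1)]) := by simp [aStep, h]

-- the two mutual loop invariants for A's machine, proved by one induction on xs:
-- (1) closed state: the flushed machine from (none, acc) equals acc ++ pvRuns;
-- (2) open state with start s: it equals acc ++ (s, end of leading run) :: pvRuns of the rest
theorem machine_runs (img : Int) (xs : List Int) :
    (∀ (k : Int) (acc : List (Int × Int)),
      aFlush ((pvEnum k xs).foldl (aStep img) (none, acc)) (k + (xs.length : Int) - 1)
        = acc ++ pvRuns img (pvEnum k xs)) ∧
    (∀ (k s : Int) (acc : List (Int × Int)),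
      aFlush ((pvEnum k xs).foldl (aStep img) (some s, acc)) (k + (xs.length : Int) - 1)
        = acc ++ (s, k + ((xs.takeWhile (fun t => t = img)).length : Int) - 1)
            :: pvRuns img (pvEnum (k + (xs.takeWhile (fun t => t = img)).length)
                                  (xs.dropWhile (fun t => t = img)))) := by
  induction xs with
  | nil =>
    constructor
    · intro k acc; simp [pvEnum, aFlush, pvRuns]
    · intro k s acc; simp [pvEnum, aFlush, pvRuns]
  | cons x xs ih =>
    obtain ⟨ih1, ih2⟩ := ih
    have hfin : ∀ k : Int, k + (((x :: xs).length : ℕ) : Int) - 1 = (k + 1) + ((xs.length : ℕ) : Int) - 1 := by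
      intro k; simp; ring
    constructor
    · intro k acc
      by_cases h : x = img
      · subst h
        rw [show pvEnum k (x :: xs) = (k, x) :: pvEnum (k + 1) xs from rfl,
          List.foldl_cons, aStep_img_none, hfin, ih2 (k + 1) k acc]
        rw [pvRuns, if_pos rfl]
        simp only [pvEnum_takeWhile, pvEnum_dropWhile, run_end_getD]
      · rw [show pvEnum k (x :: xs) = (k, x) :: pvEnum (k + 1) xs from rfl,
          List.foldl_cons, aStep_ne_none img k x acc h, hfin, ih1 (k + 1) acc]
        rw [pvRuns, if_neg h]
    · intro k s acc
      by_cases h : x = img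
      · subst h
        rw [show pvEnum k (x :: xs) = (k, x) :: pvEnum (k + 1) xs from rfl,
          List.foldl_cons, aStep_img_some, hfin, ih2 (k + 1) s acc]
        rw [List.takeWhile_cons, List.dropWhile_cons]
        simp only [decide_true, if_true, List.length_cons]
        push_cast
        ring_nf
      · rw [show pvEnum k (x :: xs) = (k, x) :: pvEnum (k + 1) xs from rfl,
          List.foldl_cons, aStep_ne_some img k x s acc h, hfin, ih1 (k + 1) (acc ++ [(s, k - 1)])]
        rw [List.takeWhile_cons, List.dropWhile_cons]
        simp only [h, decide_false, Bool.false_eq_true, if_false, List.length_nil, Nat.cast_zero, add_zero]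
        rw [show pvEnum k (x :: xs) = (k, x) :: pvEnum (k + 1) xs from rfl, pvRuns, if_neg h]
        simp

theorem bEnum_eq_pvEnum (k : Int) (xs : List Int) : bEnum k xs = pvEnum k xs := by
  induction xs generalizing k with
  | nil => rfl
  | cons x xs ih => simp [bEnum, pvEnum, ih]

-- recursive characterisations of B's two boundary passes
-- starts: prev = "previous token equals img"
def sRec (img : Int) (prev : Bool) (k : Int) : List Int → List Int
  | [] => []
  | x :: xs => if x = img ∧ prev = false then k :: sRec img true (k + 1) xs
               else sRec img (decide (x = img)) (k + 1) xs

def eRec (img : Int) (k : Int) : List Int → List Int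
  | [] => []
  | x :: xs => if x = img ∧ ¬ xs.head? = some img then k :: eRec img (k + 1) xs
               else eRec img (k + 1) xs

theorem sRec_shift (img : Int) (prev : Bool) (k : Int) (xs : List Int) :
    sRec img prev (k + 1) xs = (sRec img prev k xs).map (· + 1) := by
  induction xs generalizing prev k with
  | nil => rfl
  | cons x xs ih =>
    rw [sRec, sRec]
    split_ifs with h
    · simp [ih]
    · exact ih _ _

theorem eRec_shift (img : Int) (k : Int) (xs : List Int) :
    eRec img (k + 1) xs = (eRec img k xs).map (· + 1) := by
  induction xs generalizing k with
  | nil => rfl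
  | cons x xs ih =>
    rw [eRec, eRec]
    split_ifs with h
    · simp [ih]
    · exact ih _

-- B's index comprehension for run starts, generalised over the virtual previous token
def FS (img : Int) (b : Bool) (xs : List Int) : List Int :=
  (List.range xs.length).filterMap (fun i =>
    if xs.getD i 0 = img ∧ ¬ (if i = 0 then b = true else xs.getD (i - 1) 0 = img)
    then some (i : Int) else none)

theorem bRunStarts_eq_FS (img : Int) (xs : List Int) : bRunStarts img xs = FS img false xs := by
  unfold bRunStarts FS
  congr 1
  funext i
  rcases Nat.eq_zero_or_pos i with h0 | h0
  · subst h0; simp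
  · have : ¬ i = 0 := by omega
    simp [this]

theorem FS_eq_sRec (img : Int) (b : Bool) (xs : List Int) : FS img b xs = sRec img b 0 xs := by
  induction xs generalizing b with
  | nil => rfl
  | cons x xs ih =>
    have htail :
        (List.filterMap (fun i =>
          if (x :: xs).getD i 0 = img ∧ ¬ (if i = 0 then b = true else (x :: xs).getD (i - 1) 0 = img)
          then some (i : Int) else none) (List.map Nat.succ (List.range xs.length)))
        = (FS img (decide (x = img)) xs).map (· + 1) := by
      rw [List.filterMap_map]
      unfold FS
      rw [List.map_filterMap]
      apply List.filterMap_congr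
      intro i _
      have h1 : (x :: xs).getD (i + 1) 0 = xs.getD i 0 := rfl
      have hAB : ((x :: xs).getD (i + 1) 0 = img ∧
            ¬ (if i + 1 = 0 then b = true else (x :: xs).getD (i + 1 - 1) 0 = img))
          ↔ (xs.getD i 0 = img ∧ ¬ (if i = 0 then decide (x = img) = true else xs.getD (i - 1) 0 = img)) := by
        rw [h1]
        have h2 : ¬ (i + 1 = 0) := by omega
        rw [if_neg h2]
        rcases Nat.eq_zero_or_pos i with h0 | h0
        · subst h0
          simp [List.getD]
        · have hi0 : ¬ i = 0 := by omega
          have h3 : i + 1 - 1 = (i - 1) + 1 := by omega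
          rw [if_neg hi0, h3]
          rfl
      simp only [Function.comp_apply, Nat.succ_eq_add_one]
      by_cases hB : (xs.getD i 0 = img ∧ ¬ (if i = 0 then decide (x = img) = true else xs.getD (i - 1) 0 = img))
      · rw [if_pos (hAB.mpr hB), if_pos hB]
        simp
      · rw [if_neg (fun h => hB (hAB.mp h)), if_neg hB]
        rfl
    unfold FS
    rw [List.length_cons, List.range_succ_eq_map, List.filterMap_cons, htail, ih, sRec]
    rw [sRec_shift img true 0 xs, sRec_shift img (decide (x = img)) 0 xs]
    have hiff : ((x :: xs).getD 0 0 = img ∧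
        ¬ (if (0:ℕ) = 0 then b = true else (x :: xs).getD (0 - 1) 0 = img)) ↔ (x = img ∧ b = false) := by
      simp [List.getD]
    by_cases hx : x = img ∧ b = false
    · rw [if_pos (hiff.mpr hx), if_pos hx]
      have hd : decide (x = img) = true := by simp [hx.1]
      rw [hd]
      simp
    · rw [if_neg (fun h => hx (hiff.mp h)), if_neg hx]

-- B's index comprehension for run ends equals eRec
theorem bRunEnds_eq_eRec (img : Int) (xs : List Int) : bRunEnds img xs = eRec img 0 xs := by
  induction xs with
  | nil => rfl
  | cons x xs ih =>
    have htail :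
        (List.filterMap (fun i =>
          if (x :: xs).getD i 0 = img ∧ (i = xs.length + 1 - 1 ∨ ¬ (x :: xs).getD (i + 1) 0 = img)
          then some (i : Int) else none) (List.map Nat.succ (List.range xs.length)))
        = (bRunEnds img xs).map (· + 1) := by
      rw [List.filterMap_map]
      unfold bRunEnds
      rw [List.map_filterMap]
      apply List.filterMap_congr
      intro i hi
      have hilt : i < xs.length := List.mem_range.mp hi
      have h1 : (x :: xs).getD (i + 1) 0 = xs.getD i 0 := rfl
      have h2 : (x :: xs).getD (i + 1 + 1) 0 = xs.getD (i + 1) 0 := rfl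
      have hAB : ((x :: xs).getD (i + 1) 0 = img ∧
            (i + 1 = xs.length + 1 - 1 ∨ ¬ (x :: xs).getD (i + 1 + 1) 0 = img))
          ↔ (xs.getD i 0 = img ∧ (i = xs.length - 1 ∨ ¬ xs.getD (i + 1) 0 = img)) := by
        rw [h1, h2]
        have h3 : (i + 1 = xs.length + 1 - 1) ↔ (i = xs.length - 1) := by
          omega
        rw [h3]
      simp only [Function.comp_apply, Nat.succ_eq_add_one]
      by_cases hB : (xs.getD i 0 = img ∧ (i = xs.length - 1 ∨ ¬ xs.getD (i + 1) 0 = img))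
      · rw [if_pos (hAB.mpr hB), if_pos hB]
        simp
      · rw [if_neg (fun h => hB (hAB.mp h)), if_neg hB]
        rfl
    unfold bRunEnds
    rw [List.length_cons, List.range_succ_eq_map, List.filterMap_cons, htail, ih, eRec]
    rw [eRec_shift img 0 xs]
    have hiff : ((x :: xs).getD 0 0 = img ∧
        ((0:ℕ) = xs.length + 1 - 1 ∨ ¬ (x :: xs).getD (0 + 1) 0 = img)) ↔
        (x = img ∧ ¬ xs.head? = some img) := by
      cases xs with
      | nil => simp [List.getD]
      | cons y ys => simp [List.getD]
    by_cases hx : x = img ∧ ¬ xs.head? = some img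
    · rw [if_pos (hiff.mpr hx), if_pos hx]
      simp
    · rw [if_neg (fun h => hx (hiff.mp h)), if_neg hx]

-- walking past an all-img block leaves sRec's in-run state unchanged
theorem sRec_run (img : Int) (ys rest : List Int) (hys : ∀ t ∈ ys, t = img) (k : Int) :
    sRec img true k (ys ++ rest) = sRec img true (k + (ys.length : Int)) rest := by
  induction ys generalizing k with
  | nil => simp
  | cons y ys ih =>
    have hy : y = img := hys y (by simp)
    rw [List.cons_append, sRec]
    rw [if_neg (by simp [hy])]
    rw [show decide (y = img) = true by simp [hy]]
    rw [ih (fun t ht => hys t (by simp [ht])) (k + 1)]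
    have harith : k + 1 + ((ys.length : ℕ) : Int) = k + (((y :: ys).length : ℕ) : Int) := by
      simp only [List.length_cons]; push_cast; ring
    rw [harith]

theorem sRec_true_eq_false (img : Int) (k : Int) (rest : List Int)
    (h : ¬ rest.head? = some img) :
    sRec img true k rest = sRec img false k rest := by
  cases rest with
  | nil => rfl
  | cons z zs =>
    have hz : ¬ z = img := by simpa using h
    rw [sRec, sRec]
    simp [hz]

-- eRec over a nonempty all-img run followed by a non-run head emits the run's last index
theorem eRec_run (img : Int) (ys rest : List Int) (hys : ∀ t ∈ ys, t = img) (hne : ys ≠ [])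
    (hrest : ¬ rest.head? = some img) (k : Int) :
    eRec img k (ys ++ rest) = (k + (ys.length : Int) - 1) :: eRec img (k + (ys.length : Int)) rest := by
  induction ys generalizing k with
  | nil => exact absurd rfl hne
  | cons y ys ih =>
    have hy : y = img := hys y (by simp)
    cases ys with
    | nil =>
      rw [List.cons_append, eRec]
      rw [if_pos ⟨hy, by simpa using hrest⟩]
      simp
    | cons y2 ys2 =>
      have hy2 : y2 = img := hys y2 (by simp)
      rw [List.cons_append, eRec]
      rw [if_neg (by simp [List.cons_append, hy2])]
      rw [ih (fun t ht => hys t (by simp [ht])) (by simp) (k + 1)]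
      have h4 : k + 1 + (((y2 :: ys2).length : ℕ) : Int) = k + (((y :: y2 :: ys2).length : ℕ) : Int) := by
        simp only [List.length_cons]; push_cast; ring
      rw [h4]

-- main bridge: B's zip of boundary passes equals pvRuns, by strong induction on length
theorem zip_runs_aux (img : Int) : ∀ (n : ℕ) (xs : List Int), xs.length ≤ n → ∀ (k : Int),
    (sRec img false k xs).zip (eRec img k xs) = pvRuns img (pvEnum k xs) := by
  intro n
  induction n with
  | zero =>
    intro xs hlen k
    have : xs = [] := List.eq_nil_of_length_eq_zero (by omega)
    subst this
    simp [sRec, eRec, pvEnum, pvRuns]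
  | succ n ih =>
    intro xs hlen k
    cases xs with
    | nil => simp [sRec, eRec, pvEnum, pvRuns]
    | cons x t =>
      by_cases hx : x = img
      · -- head of a run: split t into its all-img prefix and the rest
        set tw := t.takeWhile (fun u => u = img) with htw
        set dr := t.dropWhile (fun u => u = img) with hdr
        have htdr : tw ++ dr = t := List.takeWhile_append_dropWhile
        have hall : ∀ u ∈ tw, u = img := by
          intro u hu
          have := List.mem_takeWhile_imp hu
          simpa using this
        have hdrhead : ¬ dr.head? = some img := by
          rw [hdr]
          cases hd : t.dropWhile (fun u => u = img) with
          | nil => simp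
          | cons z zs =>
            have := List.head?_dropWhile_not (fun u => decide (u = img)) t
            rw [hd] at this
            simpa using this
        have hdrlen : dr.length ≤ n := by
          have h1 : dr.length ≤ t.length := by
            rw [← htdr]; simp
          simp at hlen; omega
        -- left side
        have hs : sRec img false k (x :: t)
            = k :: sRec img false (k + 1 + (tw.length : Int)) dr := by
          rw [sRec, if_pos ⟨hx, rfl⟩, ← htdr, sRec_run img tw dr hall (k + 1),
            sRec_true_eq_false img _ dr hdrhead]
        have he : eRec img k (x :: t)
            = (k + 1 + (tw.length : Int) - 1) :: eRec img (k + 1 + (tw.length : Int)) dr := by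
          have := eRec_run img (x :: tw) dr
            (by
              intro u hu
              cases List.mem_cons.mp hu with
              | inl h => exact h ▸ hx
              | inr h => exact hall u h)
            (by simp) hdrhead k
          rw [show (x :: tw) ++ dr = x :: t by rw [List.cons_append, htdr]] at this
          rw [this]
          have h4 : k + (((x :: tw).length : ℕ) : Int) = k + 1 + ((tw.length : ℕ) : Int) := by
            simp only [List.length_cons]; push_cast; ring
          rw [h4]
        rw [hs, he, List.zip_cons_cons, ih dr hdrlen (k + 1 + (tw.length : Int))]
        -- right side
        rw [show pvEnum k (x :: t) = (k, x) :: pvEnum (k + 1) t from rfl, pvRuns, if_pos hx]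
        simp only [pvEnum_takeWhile, pvEnum_dropWhile, run_end_getD]
        have h5 : k + 1 + ((tw.length : ℕ) : Int) - 1 = k + ((tw.length : ℕ) : Int) := by ring
        have h6 : k + 1 + ((tw.length : ℕ) : Int) = k + 1 + (((t.takeWhile (fun u => u = img)).length : ℕ) : Int) := by
          rw [← htw]
        rw [h5]
      · rw [show pvEnum k (x :: t) = (k, x) :: pvEnum (k + 1) t from rfl, pvRuns, if_neg hx]
        rw [sRec, if_neg (by simp [hx]), show decide (x = img) = false by simp [hx]]
        rw [eRec, if_neg (by simp [hx])]
        exact ih t (by simp at hlen; omega) (k + 1)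

theorem bZip_eq_pvRuns (img : Int) (xs : List Int) :
    (bRunStarts img xs).zip (bRunEnds img xs) = pvRuns img (pvEnum 0 xs) := by
  rw [bRunStarts_eq_FS, FS_eq_sRec, bRunEnds_eq_eRec]
  exact zip_runs_aux img xs.length xs le_rfl 0

-- branch 1: A's foldl-with-append equals B's filtering comprehension
theorem foldl_if_append_filterMap (l : List (Int × Int)) (acc : List (Int × Int)) :
    l.foldl (fun offsets p => if p.1 < p.2 then offsets ++ [(p.1 + 1, p.2 - 1)] else offsets) acc
      = acc ++ l.filterMap (fun p => if p.1 < p.2 then some (p.1 + 1, p.2 - 1) else none) := by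
  induction l generalizing acc with
  | nil => simp
  | cons p l ih =>
    rw [List.foldl_cons, List.filterMap_cons]
    split_ifs with h
    · rw [ih]; simp
    · rw [ih]

-- ===== VERDICT (by name: the statement is the Claim_ definition above) =====
theorem get_image_token_offsets_spec : Claim_equal_get_image_token_offsets := by
  intro input_ids image_token_id vision_start_id vision_end_id _
  unfold Spec_get_image_token_offsets get_image_token_offsets get_image_token_offsets_alt
  match vision_start_id, vision_end_id with
  | some vs, some ve =>
    simp only [bEnum_eq_pvEnum]
    rw [foldl_if_append_filterMap]
    rfl
  | none, some ve | some vs, none | none, none =>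
    match image_token_id with
    | none => rfl
    | some img =>
      simp only [bImageBranch]
      rw [bZip_eq_pvRuns]
      have h := (machine_runs img input_ids).1 0 []
      simp only [zero_add, List.nil_append] at h
      rw [← h]
      rfl
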